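-- pv_equiv track=rewrite | github.com/cradbold/practice | src/list_utils.py | scores_to_medal_placements
-- ===== SOURCE A (Python) =====
-- from typing import Optional, Callable, List, Any, Tuple
--
-- def scores_to_medal_placements(scores: List[int]) -> List[str]:
--     medals = [None, 'Gold Medal', 'Silver Medal', 'Bronze Medal']
--     suffixes = [None, 'st', 'nd', 'rd', 'th', 'th', 'th', 'th', 'th', 'th']
--
--     def rank_to_place(rank: int) -> str:
--         if (rank < 4):
--             return medals[rank]
--         else:
--             return f'{rank}{suffixes[rank % 10]}'
--
--     sorted_scores = sorted(scores, reverse=True)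
--     score_rank_map = {}
--     for place, score in enumerate(sorted_scores):
--         score_rank_map[score] = place + 1
--
--     for i, score in enumerate(scores):
--         scores[i] = rank_to_place(score_rank_map[score])
--
--     return scores
-- ===== SOURCE B (Python) =====
-- from typing import List
--
-- def scores_to_medal_placements(scores: List[int]) -> List[str]:
--     medals = [None, 'Gold Medal', 'Silver Medal', 'Bronze Medal']
--     suffixes = [None, 'st', 'nd', 'rd', 'th', 'th', 'th', 'th', 'th', 'th']
--
--     def rank_to_place(rank: int) -> str:
--         if rank < 4:
--             return medals[rank]
--         else:
--             return f'{rank}{suffixes[rank % 10]}'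
--
--     # no sort, no dict: rank of x = number of scores >= x (equals A's last-occurrence rank)
--     places = [rank_to_place(sum(1 for s in scores if s >= x)) for x in scores]
--     scores[:] = places
--     return scores
-- ===== Notes on version B (the rewrite author's own statement) =====
-- stated objective: simpler
-- what changed: Replaces the sort-then-rank-dict pipeline (sort descending, build a dict where duplicate keys overwrite, rewrite the list) by a direct per-element count with no sort and no dict: the rank of x is the number of scores >= x, which equals A's last-occurrence rank.
import Mathlib
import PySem

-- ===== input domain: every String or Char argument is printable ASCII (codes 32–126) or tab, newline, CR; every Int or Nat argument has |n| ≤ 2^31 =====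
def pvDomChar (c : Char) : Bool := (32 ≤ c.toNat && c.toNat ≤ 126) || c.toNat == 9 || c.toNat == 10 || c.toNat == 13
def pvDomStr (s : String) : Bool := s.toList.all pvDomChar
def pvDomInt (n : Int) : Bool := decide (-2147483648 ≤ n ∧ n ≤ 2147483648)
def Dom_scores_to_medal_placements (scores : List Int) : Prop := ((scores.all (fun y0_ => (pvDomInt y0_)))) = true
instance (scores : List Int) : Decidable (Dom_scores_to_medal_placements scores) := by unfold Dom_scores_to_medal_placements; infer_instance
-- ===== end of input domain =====

-- B replaces A's sort + rank-dict pipeline by a direct per-element count (rank of x = number of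
-- scores >= x); objective: simpler. Both Pythons mutate `scores` in place; the equivalence proved
-- here is about the RETURN value (B performs the same in-place rewrite).

-- ===== PORT A =====
-- shared helper: the inner rank_to_place of both Pythons (identical in A and B).
-- ranks reaching it are always ≥ 1, so medals[0] = None is unreachable ("" stands for it);
-- for rank % 10 = 0, Python's f-string renders suffixes[0] = None as the string "None".
def pvRankToPlace (rank : Int) : String :=
  if rank < 4 then
    PySem.List.pyGetD ["", "Gold Medal", "Silver Medal", "Bronze Medal"] rank ""
  else
    PySem.Int.toStr rank ++
      PySem.List.pyGetD ["None", "st", "nd", "rd", "th", "th", "th", "th", "th", "th"]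
        (PySem.Int.mod rank 10) ""

def scores_to_medal_placements (scores : List Int) : List String :=
  let sorted_scores := PySem.List.sorted scores (fun x => x) true
  let score_rank_map :=
    (PySem.List.enumerate sorted_scores 0).foldl
      (fun d p => d.insert p.2 (p.1 + 1)) (PySem.Dict.empty : PySem.Dict Int Int)
  -- second loop: scores[i] = rank_to_place(score_rank_map[score]); every score is a key, so
  -- the KeyError branch (getD default 0) is unreachable
  scores.map (fun score => pvRankToPlace (score_rank_map.getD score 0))

-- ===== PORT B =====
def scores_to_medal_placements_alt (scores : List Int) : List String :=
  -- places = [rank_to_place(sum(1 for s in scores if s >= x)) for x in scores]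
  scores.map (fun x => pvRankToPlace ((scores.countP (fun s => decide (x ≤ s)) : Int)))

-- ===== PRECONDITION & SPEC =====
def Spec_scores_to_medal_placements (scores : List Int) (out : List String) : Prop := out = scores_to_medal_placements_alt scores
instance (scores : List Int) (out : List String) : Decidable (Spec_scores_to_medal_placements scores out) := by unfold Spec_scores_to_medal_placements; infer_instance

-- ===== CLAIM (what is proved, stated in full; the proofs are below) =====
def Claim_equal_scores_to_medal_placements : Prop := ∀ (scores : List Int), Dom_scores_to_medal_placements scores → Spec_scores_to_medal_placements scores (scores_to_medal_placements scores)

-- ===== LEMMAS AND PROOFS =====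

-- the rank-dict loop leaves keys not in the traversed list untouched
theorem pv_fold_getD_not_mem (x : Int) :
    ∀ (r : List Int) (d : PySem.Dict Int Int) (s : Int), x ∉ r →
      ((PySem.List.enumerate r s).foldl (fun d p => d.insert p.2 (p.1 + 1)) d).getD x 0
        = d.getD x 0 := by
  intro r
  induction r with
  | nil => intro d s _; simp [PySem.List.enumerate]
  | cons a t ih =>
    intro d s hx
    rw [PySem.List.enumerate_cons]
    simp only [List.foldl_cons]
    rw [ih _ _ (by simp_all)]
    rw [PySem.Dict.getD_insert]
    simp_all

-- on a nonincreasing list, the dict's rank of a member x (last occurrence wins)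
-- is s + (number of elements ≥ x)
theorem pv_fold_getD_mem (x : Int) :
    ∀ (r : List Int), r.Pairwise (fun a b => b ≤ a) → x ∈ r →
      ∀ (d : PySem.Dict Int Int) (s : Int),
      ((PySem.List.enumerate r s).foldl (fun d p => d.insert p.2 (p.1 + 1)) d).getD x 0
        = s + (r.countP (fun y => x ≤ y) : Int) := by
  intro r
  induction r with
  | nil => intro _ hx; cases hx
  | cons a t ih =>
    intro hp hx d s
    rw [PySem.List.enumerate_cons]
    simp only [List.foldl_cons]
    have hle : ∀ b ∈ t, b ≤ a := (List.pairwise_cons.mp hp).1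
    by_cases hxt : x ∈ t
    · rw [ih (List.pairwise_cons.mp hp).2 hxt _ (s + 1)]
      have hxa : x ≤ a := hle x hxt
      rw [List.countP_cons]
      simp [hxa]
      ring
    · have hxa : x = a := by rcases List.mem_cons.mp hx with h | h; exact h; exact absurd h hxt
      subst hxa
      rw [pv_fold_getD_not_mem x t _ _ hxt]
      rw [PySem.Dict.getD_insert_self]
      have hct : t.countP (fun y => x ≤ y) = 0 := by
        rw [List.countP_eq_zero]
        intro b hb
        have h1 : b ≤ x := hle b hb
        have h2 : b ≠ x := fun h => hxt (h ▸ hb)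
        simp
        omega
      rw [List.countP_cons]
      simp [hct]

-- ===== VERDICT (by name: the statement is the Claim_ definition above) =====
theorem scores_to_medal_placements_spec : Claim_equal_scores_to_medal_placements := by
  intro scores _
  unfold Spec_scores_to_medal_placements scores_to_medal_placements scores_to_medal_placements_alt
  apply List.map_congr_left
  intro x hx
  congr 1
  have hperm := PySem.List.sorted_perm scores (fun x => x) true
  have hpw := PySem.List.sorted_pairwise_rev scores (fun x => x)
  have hxs : x ∈ PySem.List.sorted scores (fun x => x) true :=
    (PySem.List.mem_sorted scores (fun x => x) true x).mpr hx
  rw [pv_fold_getD_mem x _ hpw hxs PySem.Dict.empty 0]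
  rw [hperm.countP_eq]
  simp
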